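-- pv_equiv track=rewrite | github.com/martinsimsa/mastermind | code_solver_general_sizes.py | create_partition_tableG
-- ===== SOURCE A (Python) =====
-- def evaluate_guessG(secret_number:int, guess_number:int, len_pegs, len_colours):
--     secret_code = transfer_int_to_codeG(secret_number, len_colours, len_pegs)
--     guess = transfer_int_to_codeG(guess_number, len_colours, len_pegs)
--
--
--     # counting the number of white and black pegs:
--     b:int = 0
--     w:int = 0
--
--     # disabling indeces so we dont match one peg with several in the guess
--     gind = [1]*len_pegs
--     scind = [1]*len_pegs
--
--     # Check for exact matches
--     for i in range(len_pegs):
--         if secret_code[i] == guess[i]: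
--             b = b+1
--             gind[i] = 0
--             scind[i] = 0
--     if b == len_pegs:
--         return [b,w]
--
--     # check for 'white' matches - right color on wrong position
--     for i in range(len_pegs):
--         if gind[i]:
--             for j in range(len_pegs):
--                 if i==j:
--                     continue
--                 elif scind[j]:
--                     if guess[i] == secret_code[j]:
--                         w = w+1
--                         scind[j] = 0
--                         break
--     return [b,w]
--
-- def check_code_scoreG(next_guess, next_score, secret_code, len_pegs, len_colours):
--     real_score = evaluate_guessG(secret_code, next_guess, len_pegs, len_colours)
--     if real_score == next_score:
--         return True
--     else:
--         return False
--
-- def transfer_int_to_codeG(number, len_colours, len_pegs):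
--     code = [0]*len_pegs
--     for i in range(len_pegs):
--         next_digit = int(number % len_colours)
--         code[len_pegs-1-i] = next_digit
--         number -= next_digit
--         number = int(number/len_colours)
--     return [code[i] + 1 for i in range(len(code))]
--
-- def create_partition_tableG(next_guess:int, possible_codes, len_pegs, len_colours, all_scores):
--     partition_table = [0]*len(all_scores)
--     partition_of_codes = []
--     #next_guess = transfer_int_to_code(next_guess)
--
--     # add function to return all possible scores for current game
--     for score in range(len(all_scores)):
--         partition_of_codes.append([])
--         # Count the number of codes from current list of possible codes that would work with this score
--         for code in possible_codes:
--             #secret_code = transfer_int_to_code(code)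
--             if check_code_scoreG(next_guess, all_scores[score], code, len_pegs, len_colours):
--                 partition_table[score] += 1
--                 partition_of_codes[score].extend([code])
--     return partition_table, partition_of_codes
-- ===== SOURCE B (Python) =====
-- # B: evaluate each possible code once and bucket it via a precomputed
-- # score -> bucket-indices dict (one pass over codes instead of re-scoring
-- # every code for every score).
--
-- def transfer_int_to_codeG(number, len_colours, len_pegs):
--     code = [0]*len_pegs
--     for i in range(len_pegs):
--         next_digit = int(number % len_colours)
--         code[len_pegs-1-i] = next_digit
--         number -= next_digit
--         number = int(number/len_colours)
--     return [code[i] + 1 for i in range(len(code))]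
--
-- def evaluate_guessG(secret_number, guess_number, len_pegs, len_colours):
--     secret_code = transfer_int_to_codeG(secret_number, len_colours, len_pegs)
--     guess = transfer_int_to_codeG(guess_number, len_colours, len_pegs)
--     b = 0
--     w = 0
--     gind = [1]*len_pegs
--     scind = [1]*len_pegs
--     for i in range(len_pegs):
--         if secret_code[i] == guess[i]:
--             b = b+1
--             gind[i] = 0
--             scind[i] = 0
--     if b == len_pegs:
--         return [b, w]
--     for i in range(len_pegs):
--         if gind[i]:
--             for j in range(len_pegs):
--                 if i == j:
--                     continue
--                 elif scind[j]:
--                     if guess[i] == secret_code[j]: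
--                         w = w+1
--                         scind[j] = 0
--                         break
--     return [b, w]
--
-- def create_partition_tableG(next_guess, possible_codes, len_pegs, len_colours, all_scores):
--     if not all_scores:
--         return [], []
--     # which bucket indices carry each distinct score
--     index = {}
--     for s, score in enumerate(all_scores):
--         index.setdefault(tuple(score), []).append(s)
--     buckets = [[] for _ in all_scores]
--     for code in possible_codes:
--         ev = tuple(evaluate_guessG(code, next_guess, len_pegs, len_colours))
--         for s in index.get(ev, ()):
--             buckets[s].append(code)
--     return [len(b) for b in buckets], buckets
-- ===== Notes on version B (the rewrite author's own statement) =====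
-- stated objective: faster
-- what changed: Instead of re-scoring every possible code once per score (S*C evaluations), B evaluates each code once and drops it into the matching buckets via a precomputed score->bucket-indices dict; intended as faster by removing the factor S (a timing run measured B >13x faster at the largest size both finished, but B still pays the per-code O(P^2) scoring cost, so both can time out on very large inputs).
import Mathlib
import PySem

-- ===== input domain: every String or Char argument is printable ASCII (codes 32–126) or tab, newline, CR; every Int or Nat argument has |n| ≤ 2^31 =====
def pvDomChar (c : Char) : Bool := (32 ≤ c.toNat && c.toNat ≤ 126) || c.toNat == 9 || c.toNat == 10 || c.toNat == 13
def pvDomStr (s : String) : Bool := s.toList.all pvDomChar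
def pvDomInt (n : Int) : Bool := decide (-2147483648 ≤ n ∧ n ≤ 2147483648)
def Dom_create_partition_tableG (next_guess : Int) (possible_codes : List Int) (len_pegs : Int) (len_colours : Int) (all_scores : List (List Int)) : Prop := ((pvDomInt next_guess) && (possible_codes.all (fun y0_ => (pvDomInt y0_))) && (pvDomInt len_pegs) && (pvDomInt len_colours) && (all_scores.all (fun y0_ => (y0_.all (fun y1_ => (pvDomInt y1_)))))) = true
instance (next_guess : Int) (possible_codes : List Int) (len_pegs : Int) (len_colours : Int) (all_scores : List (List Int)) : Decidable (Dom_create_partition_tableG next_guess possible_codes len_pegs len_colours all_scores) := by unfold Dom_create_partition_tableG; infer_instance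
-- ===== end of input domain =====

-- B buckets each possible code in ONE pass via a score -> bucket-indices dict, instead of A's
-- re-scoring of every code once per score (objective: faster; intended as faster, the timing
-- run measured B >13x at the largest size both finished, though B keeps the per-code scoring cost).

-- ===== PORT A =====
-- transfer_int_to_codeG; 'int(number/len_colours)' is PySem.Int.truncdiv (exact for |args| < 2^53, so on Dom)
def pvTransferG (number : Int) (len_colours : Int) (len_pegs : Int) : List Int :=
  let st := (PySem.List.pyRange 0 len_pegs 1).foldl
    (fun (st : List Int × Int) i =>
      let code := st.1
      let number := st.2
      let next_digit := PySem.Int.mod number len_colours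
      let code := PySem.List.pySetD code (len_pegs - 1 - i) next_digit
      let number := number - next_digit
      let number := PySem.Int.truncdiv number len_colours
      (code, number))
    (List.replicate len_pegs.toNat 0, number)
  (PySem.List.pyRange 0 (st.1.length : Int) 1).map (fun i => PySem.List.pyGetD st.1 i 0 + 1)

-- the inner 'for j in range(len_pegs)' loop (with continue/break) of evaluate_guessG; state = (w, scind)
def pvWhiteScanG (g_i : Int) (secret_code : List Int) (i : Int) :
    List Int → Int × List Int → Int × List Int
  | [], st => st
  | j :: js, st =>
    if j = i then pvWhiteScanG g_i secret_code i js st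
    else if PySem.List.pyGetD st.2 j 0 ≠ 0 then
      if g_i = PySem.List.pyGetD secret_code j 0 then
        (st.1 + 1, PySem.List.pySetD st.2 j 0)     -- break
      else pvWhiteScanG g_i secret_code i js st
    else pvWhiteScanG g_i secret_code i js st

def pvEvaluateG (secret_number guess_number len_pegs len_colours : Int) : List Int :=
  let secret_code := pvTransferG secret_number len_colours len_pegs
  let guess := pvTransferG guess_number len_colours len_pegs
  let gind0 : List Int := List.replicate len_pegs.toNat 1
  let scind0 : List Int := List.replicate len_pegs.toNat 1
  let st := (PySem.List.pyRange 0 len_pegs 1).foldl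
    (fun (st : Int × List Int × List Int) i =>
      if PySem.List.pyGetD secret_code i 0 = PySem.List.pyGetD guess i 0 then
        (st.1 + 1, PySem.List.pySetD st.2.1 i 0, PySem.List.pySetD st.2.2 i 0)
      else st)
    (0, gind0, scind0)
  if st.1 = len_pegs then [st.1, 0]
  else
    let w2 := (PySem.List.pyRange 0 len_pegs 1).foldl
      (fun (wst : Int × List Int) i =>
        if PySem.List.pyGetD st.2.1 i 0 ≠ 0 then
          pvWhiteScanG (PySem.List.pyGetD guess i 0) secret_code i
            (PySem.List.pyRange 0 len_pegs 1) wst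
        else wst)
      (0, st.2.2)
    [st.1, w2.1]

def pvCheckG (next_guess : Int) (next_score : List Int) (secret_code : Int)
    (len_pegs len_colours : Int) : Bool :=
  pvEvaluateG secret_code next_guess len_pegs len_colours = next_score

def create_partition_tableG (next_guess : Int) (possible_codes : List Int) (len_pegs : Int) (len_colours : Int) (all_scores : List (List Int)) : List Int × List (List Int) :=
  (PySem.List.pyRange 0 (all_scores.length : Int) 1).foldl
    (fun (st : List Int × List (List Int)) score =>
      let st := (st.1, st.2 ++ [[]])
      possible_codes.foldl
        (fun (st : List Int × List (List Int)) code =>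
          if pvCheckG next_guess (PySem.List.pyGetD all_scores score []) code len_pegs len_colours then
            (PySem.List.pySetD st.1 score (PySem.List.pyGetD st.1 score 0 + 1),
             PySem.List.pySetD st.2 score (PySem.List.pyGetD st.2 score [] ++ [code]))
          else st)
        st)
    (List.replicate all_scores.length 0, [])

-- ===== PORT B =====
def create_partition_tableG_alt (next_guess : Int) (possible_codes : List Int) (len_pegs : Int) (len_colours : Int) (all_scores : List (List Int)) : List Int × List (List Int) :=
  if all_scores = [] then ([], [])
  else
    -- index.setdefault(tuple(score), []).append(s)  ==  modify score [] (· ++ [s])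
    let index := (PySem.List.enumerate all_scores).foldl
      (fun (d : PySem.Dict (List Int) (List Int)) p => d.modify p.2 [] (· ++ [p.1]))
      PySem.Dict.empty
    let buckets0 : List (List Int) := all_scores.map (fun _ => [])
    let buckets := possible_codes.foldl
      (fun (bs : List (List Int)) code =>
        let ev := pvEvaluateG code next_guess len_pegs len_colours
        (index.getD ev []).foldl
          (fun bs s => PySem.List.pySetD bs s (PySem.List.pyGetD bs s [] ++ [code])) bs)
      buckets0
    (buckets.map (fun b => (b.length : Int)), buckets)

-- ===== PRECONDITION & SPEC =====
-- Pre_ excludes exactly the inputs on which A raises ZeroDivisionError: len_colours = 0 while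
-- evaluate_guessG is actually reached (len_pegs ≥ 1, both all_scores and possible_codes non-empty).
def Pre_create_partition_tableG (next_guess : Int) (possible_codes : List Int) (len_pegs : Int) (len_colours : Int) (all_scores : List (List Int)) : Prop :=
  len_colours ≠ 0 ∨ len_pegs ≤ 0 ∨ all_scores = [] ∨ possible_codes = []
instance (next_guess : Int) (possible_codes : List Int) (len_pegs : Int) (len_colours : Int) (all_scores : List (List Int)) : Decidable (Pre_create_partition_tableG next_guess possible_codes len_pegs len_colours all_scores) := by unfold Pre_create_partition_tableG; infer_instance

def pvWitness_create_partition_tableG : Int × List Int × Int × Int × List (List Int) :=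
  (1, [0, 1, 2, 3], 2, 2, [[0, 0], [1, 0], [0, 1], [2, 0], [1, 1], [0, 2]])

def Spec_create_partition_tableG (next_guess : Int) (possible_codes : List Int) (len_pegs : Int) (len_colours : Int) (all_scores : List (List Int)) (out : List Int × List (List Int)) : Prop := out = create_partition_tableG_alt next_guess possible_codes len_pegs len_colours all_scores
instance (next_guess : Int) (possible_codes : List Int) (len_pegs : Int) (len_colours : Int) (all_scores : List (List Int)) (out : List Int × List (List Int)) : Decidable (Spec_create_partition_tableG next_guess possible_codes len_pegs len_colours all_scores out) := by unfold Spec_create_partition_tableG; infer_instance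

-- ===== CLAIM (what is proved, stated in full; the proofs are below) =====
def Claim_equal_create_partition_tableG : Prop := ∀ (next_guess : Int) (possible_codes : List Int) (len_pegs : Int) (len_colours : Int) (all_scores : List (List Int)), Dom_create_partition_tableG next_guess possible_codes len_pegs len_colours all_scores → Pre_create_partition_tableG next_guess possible_codes len_pegs len_colours all_scores → Spec_create_partition_tableG next_guess possible_codes len_pegs len_colours all_scores (create_partition_tableG next_guess possible_codes len_pegs len_colours all_scores)

-- ===== LEMMAS AND PROOFS =====

lemma pv_innerA (Q : Int → Bool) (codes : List Int) :
    ∀ (pt : List Int) (poc : List (List Int)) (m : Nat), m < pt.length → m < poc.length →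
    codes.foldl
      (fun (st : List Int × List (List Int)) code =>
        if Q code then
          (st.1.set m (st.1.getD m 0 + 1), st.2.set m (st.2.getD m [] ++ [code]))
        else st) (pt, poc)
    = (pt.set m (pt.getD m 0 + (codes.countP Q : Int)),
       poc.set m (poc.getD m [] ++ codes.filter Q)) := by
  induction codes with
  | nil =>
    intro pt poc m hpt hpoc
    simp [List.getD, List.getElem?_eq_getElem hpt, List.getElem?_eq_getElem hpoc,
      List.set_getElem_self]
  | cons c rest ih =>
    intro pt poc m hpt hpoc
    simp only [List.foldl_cons]
    by_cases hq : Q c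
    · simp only [hq, if_pos]
      rw [ih _ _ m (by simpa using hpt) (by simpa using hpoc)]
      rw [List.set_set, List.set_set]
      have h1 : (pt.set m (pt.getD m 0 + 1)).getD m 0 = pt.getD m 0 + 1 := by
        simp [List.getD, hpt]
      have h2 : (poc.set m (poc.getD m [] ++ [c])).getD m [] = poc.getD m [] ++ [c] := by
        simp [List.getD, hpoc]
      rw [h1, h2]
      simp [hq]
      congr 1
      ring
    · simp only [hq, Bool.false_eq_true, if_neg, not_false_iff]
      rw [ih _ _ m hpt hpoc]
      simp [List.countP_cons, hq]

lemma pv_A_char (ng : Int) (pcs : List Int) (lp lc : Int) (scores : List (List Int)) :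
    create_partition_tableG ng pcs lp lc scores
    = ((List.range scores.length).map
         (fun s => ((pcs.filter (fun c => pvCheckG ng (scores.getD s []) c lp lc)).length : Int)),
       (List.range scores.length).map
         (fun s => pcs.filter (fun c => pvCheckG ng (scores.getD s []) c lp lc))) := by
  unfold create_partition_tableG
  have hr : PySem.List.pyRange 0 (scores.length : Int) 1
      = (List.range scores.length).map (fun (k : Nat) => (k : Int)) := by
    rw [PySem.List.pyRange_one]; simp [List.map_eq_flatMap]
  rw [hr, List.foldl_map]
  simp only [PySem.List.pySetD_natCast, PySem.List.pyGetD_natCast]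
  have aux : ∀ m, m ≤ scores.length →
      (List.range m).foldl
        (fun (st : List Int × List (List Int)) (k : Nat) =>
          pcs.foldl
            (fun (st : List Int × List (List Int)) code =>
              if pvCheckG ng (scores.getD k []) code lp lc then
                (st.1.set k (st.1.getD k 0 + 1), st.2.set k (st.2.getD k [] ++ [code]))
              else st)
            (st.1, st.2 ++ [[]]))
        (List.replicate scores.length 0, [])
      = ((List.range m).map
           (fun s => ((pcs.filter (fun c => pvCheckG ng (scores.getD s []) c lp lc)).length : Int))
           ++ List.replicate (scores.length - m) 0,
         (List.range m).map
           (fun s => pcs.filter (fun c => pvCheckG ng (scores.getD s []) c lp lc))) := by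
    intro m
    induction m with
    | zero => simp
    | succ m ih =>
      intro hm
      rw [List.range_succ, List.foldl_append, ih (Nat.le_of_succ_le hm)]
      simp only [List.foldl_cons, List.foldl_nil]
      rw [pv_innerA _ pcs _ _ m (by simp; omega) (by simp)]
      simp only [Prod.mk.injEq]
      constructor
      · -- table component
        rw [List.set_append_right _ _ (by simp)]
        have hlen : ((List.range m).map
            (fun s => ((pcs.filter (fun c => pvCheckG ng (scores.getD s []) c lp lc)).length : Int))).length = m := by simp
        rw [List.getD, List.getElem?_append_right (by simp [hlen])]
        have hnm : scores.length - m = (scores.length - (m+1)) + 1 := by omega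
        simp only [hlen, Nat.sub_self, hnm, List.replicate_succ]
        simp [List.range_succ, List.countP_eq_length_filter]
      · -- buckets component
        have hlen : ((List.range m).map
            (fun s => pcs.filter (fun c => pvCheckG ng (scores.getD s []) c lp lc))).length = m := by simp
        rw [List.set_append_right _ _ (by simp [hlen])]
        rw [List.getD, List.getElem?_append_right (by simp [hlen])]
        simp [hlen, List.range_succ]
  have := aux scores.length (le_refl _)
  simpa using this

lemma pv_enumFilter (k : List Int) :
    ∀ (scores : List (List Int)) (s0 : Int),
    ((PySem.List.enumerate scores s0).filter (fun p => p.2 == k)).map (·.1)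
    = ((List.range scores.length).filter (fun i => scores.getD i [] == k)).map (fun (i : Nat) => s0 + (i : Int)) := by
  intro scores
  induction scores with
  | nil => intro s0; simp [PySem.List.enumerate_nil]
  | cons x xs ih =>
    intro s0
    rw [PySem.List.enumerate_cons]
    rw [List.length_cons, List.range_succ_eq_map]
    rw [List.filter_cons, List.filter_cons]
    by_cases hx : (x == k) = true
    · simp only [hx, if_pos, List.getD_cons_zero, List.map_cons]
      rw [ih (s0+1)]
      simp only [List.filter_map, List.map_map, Function.comp_def, List.getD_cons_succ]
      congr 1
      · simp
      · apply List.map_congr_left; intro i _; push_cast; ring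
    · simp only [hx, List.getD_cons_zero, Bool.false_eq_true, if_neg, not_false_iff]
      rw [ih (s0+1)]
      simp only [List.filter_map, List.map_map, Function.comp_def, List.getD_cons_succ]
      apply List.map_congr_left; intro i _; push_cast; ring

lemma pv_indexGetD (scores : List (List Int)) (k : List Int) :
    ((PySem.List.enumerate scores).foldl
       (fun (d : PySem.Dict (List Int) (List Int)) p => d.modify p.2 [] (· ++ [p.1]))
       PySem.Dict.empty).getD k []
    = ((List.range scores.length).filter (fun i => scores.getD i [] == k)).map (fun (i : Nat) => (i : Int)) := by
  have hfold : (PySem.List.enumerate scores).foldl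
       (fun (d : PySem.Dict (List Int) (List Int)) p => d.modify p.2 [] (· ++ [p.1]))
       PySem.Dict.empty
     = ((PySem.List.enumerate scores).map (fun p => (p.2, p.1))).foldl
       (fun (d : PySem.Dict (List Int) (List Int)) p => d.modify p.1 [] (· ++ [p.2]))
       PySem.Dict.empty := by
    rw [List.foldl_map]
  rw [hfold, PySem.Dict.getD_foldl_modify_append]
  simp only [PySem.Dict.getD_empty, List.nil_append, List.filter_map, List.map_map,
    Function.comp_def]
  have := pv_enumFilter k scores 0
  simp only [zero_add] at this
  rw [this]

lemma pv_bucketFold (code : Int) :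
    ∀ (L : List Nat) (bs : List (List Int)), L.Nodup → (∀ i ∈ L, i < bs.length) →
    ((L.foldl (fun bs i => bs.set i (bs.getD i [] ++ [code])) bs).length = bs.length ∧
     ∀ t, (L.foldl (fun bs i => bs.set i (bs.getD i [] ++ [code])) bs).getD t []
          = bs.getD t [] ++ (if t ∈ L then [code] else [])) := by
  intro L
  induction L with
  | nil => intro bs _ _; simp
  | cons j js ih =>
    intro bs hnd hlt
    simp only [List.foldl_cons]
    have hj : j < bs.length := hlt j (by simp)
    have hnd' : js.Nodup := (List.nodup_cons.mp hnd).2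
    have hjns : j ∉ js := (List.nodup_cons.mp hnd).1
    have hlt' : ∀ i ∈ js, i < (bs.set j (bs.getD j [] ++ [code])).length := by
      intro i hi; simpa using hlt i (by simp [hi])
    obtain ⟨hlen, hpt⟩ := ih (bs.set j (bs.getD j [] ++ [code])) hnd' hlt'
    constructor
    · simpa using hlen
    · intro t
      rw [hpt t]
      by_cases ht : t = j
      · subst ht
        have : (bs.set t (bs.getD t [] ++ [code])).getD t [] = bs.getD t [] ++ [code] := by
          simp [List.getD, hj]
        rw [this]
        simp [hjns]
      · have : (bs.set j (bs.getD j [] ++ [code])).getD t [] = bs.getD t [] := by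
          simp [List.getD, List.getElem?_set_ne (by omega : j ≠ t)]
        rw [this]
        simp [ht, List.mem_cons]

lemma pv_B_char (ng lp lc : Int) (scores : List (List Int)) (hne : scores ≠ []) (pcs : List Int) :
    create_partition_tableG_alt ng pcs lp lc scores
    = ((List.range scores.length).map
         (fun s => ((pcs.filter (fun c => pvCheckG ng (scores.getD s []) c lp lc)).length : Int)),
       (List.range scores.length).map
         (fun s => pcs.filter (fun c => pvCheckG ng (scores.getD s []) c lp lc))) := by
  unfold create_partition_tableG_alt
  rw [if_neg hne]
  simp only []
  set n := scores.length with hn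
  -- one step of the code loop, via the index dict
  have step : ∀ (code : Int) (bs : List (List Int)), bs.length = n →
      ((((PySem.List.enumerate scores).foldl
          (fun (d : PySem.Dict (List Int) (List Int)) p => d.modify p.2 [] (· ++ [p.1]))
          PySem.Dict.empty).getD (pvEvaluateG code ng lp lc) []).foldl
        (fun bs s => PySem.List.pySetD bs s (PySem.List.pyGetD bs s [] ++ [code])) bs).length = n ∧
      ∀ t, t < n →
      ((((PySem.List.enumerate scores).foldl
          (fun (d : PySem.Dict (List Int) (List Int)) p => d.modify p.2 [] (· ++ [p.1]))
          PySem.Dict.empty).getD (pvEvaluateG code ng lp lc) []).foldl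
        (fun bs s => PySem.List.pySetD bs s (PySem.List.pyGetD bs s [] ++ [code])) bs).getD t []
      = bs.getD t [] ++ (if (scores.getD t [] == pvEvaluateG code ng lp lc) = true then [code] else []) := by
    intro code bs hbs
    rw [pv_indexGetD scores (pvEvaluateG code ng lp lc), List.foldl_map]
    simp only [PySem.List.pySetD_natCast, PySem.List.pyGetD_natCast]
    have hnd : ((List.range n).filter
        (fun i => scores.getD i [] == pvEvaluateG code ng lp lc)).Nodup :=
      (List.nodup_range).filter _
    have hlt : ∀ i ∈ (List.range n).filter
        (fun i => scores.getD i [] == pvEvaluateG code ng lp lc), i < bs.length := by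
      intro i hi
      rw [hbs]
      exact List.mem_range.mp (List.mem_filter.mp hi).1
    obtain ⟨h1, h2⟩ := pv_bucketFold code _ bs hnd hlt
    refine ⟨by rw [h1, hbs], ?_⟩
    intro t ht
    rw [h2 t]
    congr 1
    simp [List.mem_filter, List.mem_range, ht]
  -- the whole code loop
  have main : ∀ (codes : List Int) (bs : List (List Int)), bs.length = n →
      ((codes.foldl (fun bs code =>
          ((((PySem.List.enumerate scores).foldl
            (fun (d : PySem.Dict (List Int) (List Int)) p => d.modify p.2 [] (· ++ [p.1]))
            PySem.Dict.empty)).getD (pvEvaluateG code ng lp lc) []).foldl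
            (fun bs s => PySem.List.pySetD bs s (PySem.List.pyGetD bs s [] ++ [code])) bs) bs).length = n ∧
       ∀ t, t < n →
        (codes.foldl (fun bs code =>
          ((((PySem.List.enumerate scores).foldl
            (fun (d : PySem.Dict (List Int) (List Int)) p => d.modify p.2 [] (· ++ [p.1]))
            PySem.Dict.empty)).getD (pvEvaluateG code ng lp lc) []).foldl
            (fun bs s => PySem.List.pySetD bs s (PySem.List.pyGetD bs s [] ++ [code])) bs) bs).getD t []
        = bs.getD t [] ++ codes.filter (fun c => scores.getD t [] == pvEvaluateG c ng lp lc)) := by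
    intro codes
    induction codes with
    | nil => intro bs hbs; exact ⟨by simpa using hbs, fun t ht => by simp⟩
    | cons c rest ih =>
      intro bs hbs
      simp only [List.foldl_cons]
      obtain ⟨hs1, hs2⟩ := step c bs hbs
      obtain ⟨hr1, hr2⟩ := ih _ hs1
      refine ⟨hr1, ?_⟩
      intro t ht
      rw [hr2 t ht, hs2 t ht, List.filter_cons, List.append_assoc]
      congr 1
      simp only [beq_iff_eq]
      split_ifs <;> simp_all
  obtain ⟨h1, h2⟩ := main pcs (scores.map (fun _ => [])) (by simpa using hn.symm)
  have hbuckets : (pcs.foldl (fun bs code =>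
          ((((PySem.List.enumerate scores).foldl
            (fun (d : PySem.Dict (List Int) (List Int)) p => d.modify p.2 [] (· ++ [p.1]))
            PySem.Dict.empty)).getD (pvEvaluateG code ng lp lc) []).foldl
            (fun bs s => PySem.List.pySetD bs s (PySem.List.pyGetD bs s [] ++ [code])) bs)
          (scores.map (fun _ => [])))
      = (List.range n).map (fun s => pcs.filter (fun c => pvCheckG ng (scores.getD s []) c lp lc)) := by
    apply List.ext_getElem
    · rw [h1]; simp
    · intro i hi hi2
      have hin : i < n := h1 ▸ hi
      have hgd := h2 i hin
      have hin' : i < scores.length := by simpa [hn] using hin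
      have hmap0 : (scores.map (fun _ => ([] : List Int))).getD i [] = [] := by
        simp [List.getD, List.getElem?_map, List.getElem?_eq_getElem hin']
      rw [hmap0, List.nil_append] at hgd
      rw [List.getElem_map]
      have hg : ∀ (l : List (List Int)) (h : i < l.length), l[i] = l.getD i [] :=
        fun l h => by simp [List.getD, List.getElem?_eq_getElem h]
      rw [hg _ hi, hgd, List.getElem_range]
      apply List.filter_congr
      intro c _
      simp only [pvCheckG]
      rw [Bool.eq_iff_iff]
      simp only [beq_iff_eq, decide_eq_true_eq]
      exact eq_comm
  rw [hbuckets, List.map_map]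
  rfl

-- ===== VERDICT (by name: the statement is the Claim_ definition above) =====
theorem create_partition_tableG_spec : Claim_equal_create_partition_tableG := by
  intro ng pcs lp lc scores _hDom _hPre
  unfold Spec_create_partition_tableG
  by_cases hne : scores = []
  · subst hne
    rw [pv_A_char]
    simp [create_partition_tableG_alt]
  · rw [pv_A_char, pv_B_char ng lp lc scores hne pcs]
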